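-- pv_equiv track=rewrite | github.com/pi0trek8/Adder | parallelPrefixStage.py | parse_to_binary
-- ===== SOURCE A (Python) =====
-- def parse_to_binary(number: int, number_of_bits: int):
--     binary_number = [0] * number_of_bits
--     index = 0
--     while number > 0 and index < number_of_bits:
--         binary_number[index] = number % 2
--         number //= 2
--         index += 1
--     return binary_number
-- ===== SOURCE B (Python) =====
-- def parse_to_binary(number: int, number_of_bits: int):
--     out = [0] * number_of_bits
--     if number > 0:
--         for i, ch in enumerate(reversed(bin(number)[2:])):
--             if i >= len(out):
--                 break
--             out[i] = int(ch)
--     return out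
-- ===== Notes on version B (the rewrite author's own statement) =====
-- stated objective: idiomatic
-- what changed: Replaces the manual divide-by-2 while-loop over a shrinking integer by a one-shot bin() string conversion whose reversed characters are written into a pre-zeroed list.
import Mathlib
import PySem

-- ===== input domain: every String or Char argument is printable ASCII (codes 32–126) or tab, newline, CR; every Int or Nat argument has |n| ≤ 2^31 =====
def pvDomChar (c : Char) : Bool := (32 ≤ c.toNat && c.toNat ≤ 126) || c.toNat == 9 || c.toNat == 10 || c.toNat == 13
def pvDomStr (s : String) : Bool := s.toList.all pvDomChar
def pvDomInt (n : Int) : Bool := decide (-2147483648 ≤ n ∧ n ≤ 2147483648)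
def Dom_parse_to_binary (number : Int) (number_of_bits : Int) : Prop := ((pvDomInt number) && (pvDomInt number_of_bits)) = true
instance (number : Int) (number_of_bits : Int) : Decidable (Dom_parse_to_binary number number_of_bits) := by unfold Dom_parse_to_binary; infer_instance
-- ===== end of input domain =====

-- B is the idiomatic rewrite: one-shot bin() conversion written into a pre-zeroed list,
-- instead of A's manual divide-by-2 while-loop. Return values proved equal on all inputs.

-- ===== PORT A =====
-- the while-loop of A: index advances, number halves, cells are overwritten in place
def parseLoopA (number index number_of_bits : Int) (binary_number : List Int) : List Int :=
  if number > 0 ∧ index < number_of_bits then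
    parseLoopA (PySem.Int.floordiv number 2) (index + 1) number_of_bits
      (binary_number.set index.toNat (PySem.Int.mod number 2))
  else binary_number
termination_by (number_of_bits - index).toNat
decreasing_by omega

def parse_to_binary (number : Int) (number_of_bits : Int) : List Int :=
  parseLoopA number 0 number_of_bits (List.replicate number_of_bits.toNat 0)

-- ===== PORT B =====
-- the for-loop of B over `enumerate(reversed(bin(number)[2:]))`; the reversed binary
-- string of a positive number, each char through int(ch), is ported as Nat.digits 2
-- (the little-endian base-2 digit list); `if i >= len(out): break` keeps the guard
def writeLoopB : List Nat → Nat → List Int → List Int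
  | [], _, out => out
  | d :: rest, i, out =>
      if i ≥ out.length then out
      else writeLoopB rest (i + 1) (out.set i (d : Int))

def parse_to_binary_alt (number : Int) (number_of_bits : Int) : List Int :=
  let out : List Int := List.replicate number_of_bits.toNat 0
  if number > 0 then writeLoopB (Nat.digits 2 number.toNat) 0 out else out

-- ===== PRECONDITION & SPEC =====
def Spec_parse_to_binary (number : Int) (number_of_bits : Int) (out : List Int) : Prop := out = parse_to_binary_alt number number_of_bits
instance (number : Int) (number_of_bits : Int) (out : List Int) : Decidable (Spec_parse_to_binary number number_of_bits out) := by unfold Spec_parse_to_binary; infer_instance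

-- ===== CLAIM (what is proved, stated in full; the proofs are below) =====
def Claim_equal_parse_to_binary : Prop := ∀ (number : Int) (number_of_bits : Int), Dom_parse_to_binary number number_of_bits → Spec_parse_to_binary number number_of_bits (parse_to_binary number number_of_bits)

-- ===== LEMMAS AND PROOFS =====

-- The two loops visit the same cells with the same values in the same order.
lemma parseLoopA_eq_writeLoopB (m : Nat) : ∀ (index number_of_bits : Int) (acc : List Int),
    0 ≤ index → acc.length = number_of_bits.toNat →
    parseLoopA (m : Int) index number_of_bits acc = writeLoopB (Nat.digits 2 m) index.toNat acc := by
  induction m using Nat.strong_induction_on with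
  | _ m ih =>
    intro index number_of_bits acc hidx hlen
    rcases Nat.eq_zero_or_pos m with hm | hm
    · subst hm
      rw [parseLoopA]
      simp [writeLoopB]
    · rw [Nat.digits_def' (by norm_num : 1 < 2) hm, parseLoopA, writeLoopB]
      by_cases hcond : index < number_of_bits
      · have hlt : ¬ index.toNat ≥ acc.length := by omega
        simp only [hlt, hcond, and_true, gt_iff_lt]
        rw [if_pos (by exact_mod_cast hm)]
        have h1 : PySem.Int.floordiv (m : Int) 2 = ((m / 2 : Nat) : Int) := by
          exact_mod_cast PySem.Int.floordiv_natCast m 2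
        have h2 : PySem.Int.mod (m : Int) 2 = ((m % 2 : Nat) : Int) := by
          exact_mod_cast PySem.Int.mod_natCast m 2
        rw [h1, h2]
        have := ih (m / 2) (Nat.div_lt_self hm (by norm_num)) (index + 1) number_of_bits
          (acc.set index.toNat ((m % 2 : Nat) : Int)) (by omega) (by simpa using hlen)
        rw [this]
        congr 1
        omega
      · have : index.toNat ≥ acc.length := by omega
        simp [hcond, this]

theorem parse_to_binary_eq (number number_of_bits : Int) :
    parse_to_binary number number_of_bits = parse_to_binary_alt number number_of_bits := by
  unfold parse_to_binary parse_to_binary_alt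
  by_cases h : number > 0
  · have hm : number = ((number.toNat : Nat) : Int) := by omega
    rw [if_pos h, hm,
      parseLoopA_eq_writeLoopB number.toNat 0 number_of_bits _ le_rfl (by simp)]
    rfl
  · rw [parseLoopA, if_neg (by tauto), if_neg h]

-- ===== VERDICT (by name: the statement is the Claim_ definition above) =====
theorem parse_to_binary_spec : Claim_equal_parse_to_binary := by
  intro number number_of_bits _
  unfold Spec_parse_to_binary
  exact parse_to_binary_eq number number_of_bits
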